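-- pv_equiv track=rewrite | github.com/MiSild/AoC_2019 | Day_8/bios_image.py | count_and_divide
-- ===== SOURCE A (Python) =====
-- width = 25
--
-- length = 6
--
-- def count_and_divide(numbers):
--     layer_zeroes = []
--     layers_themselves = []
--     zeroes_count = 0
--     row = 0
--     row_count = 0
--     current_layer = []
--     current_row = []
--     for i in numbers:
--         current_row.append(i)
--         row_count += 1
--         if i == 0:
--             zeroes_count += 1
--         if row_count == width:
--             row += 1
--             current_layer.append(current_row)
--             current_row = []
--             row_count = 0
--         if row == length:
--             row = 0
--             layers_themselves.append(current_layer)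
--             current_layer = []
--             layer_zeroes.append(zeroes_count)
--             zeroes_count = 0
--     return layer_zeroes, layers_themselves
-- ===== SOURCE B (Python) =====
-- width = 25
--
-- length = 6
--
-- def count_and_divide(numbers):
--     data = list(numbers)
--     layer_size = width * length
--     layer_zeroes = []
--     layers_themselves = []
--     for k in range(len(data) // layer_size):
--         layer = data[layer_size * k : layer_size * k + layer_size]
--         layers_themselves.append([layer[width * j : width * j + width] for j in range(length)])
--         layer_zeroes.append(layer.count(0))
--     return layer_zeroes, layers_themselves
-- ===== Notes on version B (the rewrite author's own statement) =====
-- stated objective: simpler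
-- what changed: Replaces the element-by-element counter state machine (seven pieces of mutable state, three threshold checks per element) with direct index-based chunking: slice each complete 150-element layer, slice it into 25-wide rows, and use list.count(0) per layer.
import Mathlib
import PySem

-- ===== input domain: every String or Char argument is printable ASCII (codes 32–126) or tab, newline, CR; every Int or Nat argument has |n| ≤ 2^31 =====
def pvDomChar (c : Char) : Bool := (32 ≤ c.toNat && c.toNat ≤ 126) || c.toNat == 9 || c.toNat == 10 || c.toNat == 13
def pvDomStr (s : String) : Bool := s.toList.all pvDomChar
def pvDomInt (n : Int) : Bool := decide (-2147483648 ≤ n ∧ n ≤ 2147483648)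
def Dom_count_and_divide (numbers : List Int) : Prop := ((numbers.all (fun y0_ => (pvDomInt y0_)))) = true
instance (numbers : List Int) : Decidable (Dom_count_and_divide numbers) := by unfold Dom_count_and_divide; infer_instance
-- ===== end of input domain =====

-- B replaces A's element-by-element counter state machine by direct slicing into 150-element
-- layers and 25-element rows, with a per-layer count of zeros (objective: simpler).

-- ===== PORT A =====
-- one iteration of A's for-loop;
-- state = (layer_zeroes, layers_themselves, zeroes_count, row, row_count, current_layer, current_row)
def pvStepA (s : List Int × List (List (List Int)) × Int × Int × Int × List (List Int) × List Int)
    (i : Int) : List Int × List (List (List Int)) × Int × Int × Int × List (List Int) × List Int :=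
  match s with
  | (lz, lt, zc, row, rc, cl, cr) =>
    let cr' := cr ++ [i]
    let rc' := rc + 1
    let zc' := if i = 0 then zc + 1 else zc
    if rc' = 25 then
      if row + 1 = 6 then (lz ++ [zc'], lt ++ [cl ++ [cr']], 0, 0, 0, [], [])
      else (lz, lt, zc', row + 1, 0, cl ++ [cr'], [])
    else
      if row = 6 then (lz ++ [zc'], lt ++ [cl], 0, 0, rc', [], cr')
      else (lz, lt, zc', row, rc', cl, cr')

def count_and_divide (numbers : List Int) : List Int × List (List (List Int)) :=
  let r := numbers.foldl pvStepA ([], [], 0, 0, 0, [], [])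
  (r.1, r.2.1)

-- ===== PORT B =====
def count_and_divide_alt (numbers : List Int) : List Int × List (List (List Int)) :=
  let data := numbers
  let layerSize : Int := 25 * 6
  let r := (PySem.List.pyRange 0 (PySem.Int.floordiv (data.length : Int) layerSize) 1).foldl
    (fun (acc : List Int × List (List (List Int))) k =>
      let layer := PySem.List.slice data (some (layerSize * k)) (some (layerSize * k + layerSize))
      let lt := acc.2 ++ [(PySem.List.pyRange 0 6 1).map
        (fun j => PySem.List.slice layer (some (25 * j)) (some (25 * j + 25)))]
      let lz := acc.1 ++ [((PySem.List.count layer 0 : Nat) : Int)]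
      (lz, lt))
    ([], [])
  r

-- ===== PRECONDITION & SPEC =====
def Spec_count_and_divide (numbers : List Int) (out : List Int × List (List (List Int))) : Prop := out = count_and_divide_alt numbers
instance (numbers : List Int) (out : List Int × List (List (List Int))) : Decidable (Spec_count_and_divide numbers out) := by unfold Spec_count_and_divide; infer_instance

-- ===== CLAIM (what is proved, stated in full; the proofs are below) =====
def Claim_equal_count_and_divide : Prop := ∀ (numbers : List Int), Dom_count_and_divide numbers → Spec_count_and_divide numbers (count_and_divide numbers)

-- ===== LEMMAS AND PROOFS =====

def pvC0 (l : List Int) : Int := (l.count 0 : Int)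

lemma pvC0_cons (x : Int) (l : List Int) :
    pvC0 (x :: l) = (if x = 0 then 1 else 0) + pvC0 l := by
  simp [pvC0, List.count_cons]; split_ifs <;> omega

lemma pvC0_append (a b : List Int) : pvC0 (a ++ b) = pvC0 a + pvC0 b := by
  simp [pvC0, List.count_append]

def pvRows (layer : List Int) : List (List Int) :=
  (List.range 6).map (fun j => (layer.drop (25 * j)).take 25)

lemma pvRowStep : ∀ (xs cr : List Int), xs ≠ [] → cr.length + xs.length = 25 →
    ∀ (lz : List Int) (lt : List (List (List Int))) (zc row : Int), 0 ≤ row → row < 6 →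
    ∀ (cl : List (List Int)),
    List.foldl pvStepA (lz, lt, zc, row, (cr.length : Int), cl, cr) xs =
      if row + 1 = 6 then (lz ++ [zc + pvC0 xs], lt ++ [cl ++ [cr ++ xs]], 0, 0, 0, [], [])
      else (lz, lt, zc + pvC0 xs, row + 1, 0, cl ++ [cr ++ xs], []) := by
  intro xs
  induction xs with
  | nil => intro cr h; exact absurd rfl h
  | cons x xs ih =>
    intro cr _ hlen lz lt zc row hrow0 hrow6 cl
    rw [List.foldl_cons]
    cases xs with
    | nil =>
      have h24 : cr.length = 24 := by simpa using hlen
      have : pvStepA (lz, lt, zc, row, (cr.length : Int), cl, cr) x =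
          if row + 1 = 6 then (lz ++ [if x = 0 then zc + 1 else zc], lt ++ [cl ++ [cr ++ [x]]], 0, 0, 0, [], [])
          else (lz, lt, if x = 0 then zc + 1 else zc, row + 1, 0, cl ++ [cr ++ [x]], []) := by
        simp [pvStepA, h24]
      rw [this]
      split_ifs <;> simp_all [pvC0, List.count_cons]
    | cons y ys =>
      have hne : ((cr.length : Int) + 1 ≠ 25) := by
        simp at hlen; omega
      have hrne : row ≠ 6 := by omega
      have hstep : pvStepA (lz, lt, zc, row, (cr.length : Int), cl, cr) x =
          (lz, lt, if x = 0 then zc + 1 else zc, row, ((cr ++ [x]).length : Int), cl, cr ++ [x]) := by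
        simp [pvStepA, hne, hrne]
      rw [hstep, ih (cr ++ [x]) (by simp) (by simp at hlen ⊢; omega) lz lt _ row hrow0 hrow6 cl]
      have hc : pvC0 (x :: y :: ys) = (if x = 0 then 1 else 0) + pvC0 (y :: ys) := pvC0_cons _ _
      split_ifs <;> simp_all [hc] <;> omega

lemma pvChunk6 (xs : List Int) (h : xs.length = 150) :
    ∃ c1 c2 c3 c4 c5 c6 : List Int,
      xs = c1 ++ (c2 ++ (c3 ++ (c4 ++ (c5 ++ c6)))) ∧
      c1.length = 25 ∧ c2.length = 25 ∧ c3.length = 25 ∧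
      c4.length = 25 ∧ c5.length = 25 ∧ c6.length = 25 := by
  have E : ∀ l : List Int, l = l.take 25 ++ l.drop 25 := fun l => (List.take_append_drop _ _).symm
  refine ⟨xs.take 25, (xs.drop 25).take 25, ((xs.drop 25).drop 25).take 25,
    (((xs.drop 25).drop 25).drop 25).take 25,
    ((((xs.drop 25).drop 25).drop 25).drop 25).take 25,
    ((((xs.drop 25).drop 25).drop 25).drop 25).drop 25, ?_, ?_, ?_, ?_, ?_, ?_, ?_⟩
  · conv_lhs => rw [E xs]
    congr 1
    conv_lhs => rw [E (xs.drop 25)]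
    congr 1
    conv_lhs => rw [E ((xs.drop 25).drop 25)]
    congr 1
    conv_lhs => rw [E (((xs.drop 25).drop 25).drop 25)]
    congr 1
    exact E _
  all_goals simp [h]

lemma pvRows_chunks (c1 c2 c3 c4 c5 c6 : List Int)
    (h1 : c1.length = 25) (h2 : c2.length = 25) (h3 : c3.length = 25)
    (h4 : c4.length = 25) (h5 : c5.length = 25) (h6 : c6.length = 25) :
    pvRows (c1 ++ (c2 ++ (c3 ++ (c4 ++ (c5 ++ c6))))) = [c1, c2, c3, c4, c5, c6] := by
  have D : ∀ (a r : List Int), a.length = 25 → ∀ n : Nat,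
      List.drop (25 + n) (a ++ r) = List.drop n r := by
    intro a r h n
    rw [← List.drop_drop, List.drop_left' h]
  have e : List.range 6 = [0, 1, 2, 3, 4, 5] := rfl
  simp only [pvRows, e, List.map]
  norm_num
  refine ⟨?_, ?_, ?_, ?_, ?_, ?_⟩
  · rw [List.take_left' h1]
  · rw [List.drop_left' h1, List.take_left' h2]
  · rw [show (50:Nat) = 25 + 25 from rfl, D _ _ h1, List.drop_left' h2, List.take_left' h3]
  · rw [show (75:Nat) = 25 + 50 from rfl, D _ _ h1, show (50:Nat) = 25 + 25 from rfl,
      D _ _ h2, List.drop_left' h3, List.take_left' h4]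
  · rw [show (100:Nat) = 25 + 75 from rfl, D _ _ h1, show (75:Nat) = 25 + 50 from rfl,
      D _ _ h2, show (50:Nat) = 25 + 25 from rfl, D _ _ h3, List.drop_left' h4, List.take_left' h5]
  · rw [show (125:Nat) = 25 + 100 from rfl, D _ _ h1, show (100:Nat) = 25 + 75 from rfl,
      D _ _ h2, show (75:Nat) = 25 + 50 from rfl, D _ _ h3, show (50:Nat) = 25 + 25 from rfl,
      D _ _ h4, List.drop_left' h5, ← h6, List.take_length]

lemma pvLayerFold (xs : List Int) (h : xs.length = 150)
    (lz : List Int) (lt : List (List (List Int))) :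
    List.foldl pvStepA (lz, lt, 0, 0, 0, [], []) xs =
      (lz ++ [pvC0 xs], lt ++ [pvRows xs], 0, 0, 0, [], []) := by
  obtain ⟨c1, c2, c3, c4, c5, c6, hx, h1, h2, h3, h4, h5, h6⟩ := pvChunk6 xs h
  subst hx
  have R : ∀ (c : List Int), c.length = 25 → ∀ lz lt zc (row : Int), 0 ≤ row → row < 6 →
      ∀ cl, List.foldl pvStepA (lz, lt, zc, row, 0, cl, []) c =
        if row + 1 = 6 then (lz ++ [zc + pvC0 c], lt ++ [cl ++ [c]], 0, 0, 0, [], [])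
        else (lz, lt, zc + pvC0 c, row + 1, 0, cl ++ [c], []) := by
    intro c hc lz lt zc row h0 h6' cl
    have := pvRowStep c [] (by intro hcc; rw [hcc] at hc; simp at hc) (by simpa using hc)
      lz lt zc row h0 h6' cl
    simpa using this
  rw [List.foldl_append, List.foldl_append, List.foldl_append, List.foldl_append,
    List.foldl_append]
  rw [R c1 h1 _ _ _ _ (by norm_num) (by norm_num) _]
  norm_num
  rw [R c2 h2 _ _ _ _ (by norm_num) (by norm_num) _]
  norm_num
  rw [R c3 h3 _ _ _ _ (by norm_num) (by norm_num) _]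
  norm_num
  rw [R c4 h4 _ _ _ _ (by norm_num) (by norm_num) _]
  norm_num
  rw [R c5 h5 _ _ _ _ (by norm_num) (by norm_num) _]
  norm_num
  rw [R c6 h6 _ _ _ _ (by norm_num) (by norm_num) _]
  norm_num
  rw [pvRows_chunks c1 c2 c3 c4 c5 c6 h1 h2 h3 h4 h5 h6]
  simp [pvC0_append]
  ring

lemma pvTailFold : ∀ (xs cr : List Int) (zc row : Int) (cl : List (List Int))
    (lz : List Int) (lt : List (List (List Int))), 0 ≤ row → cr.length < 25 →
    25 * row + cr.length + xs.length < 150 →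
    ((List.foldl pvStepA (lz, lt, zc, row, (cr.length : Int), cl, cr) xs).1,
     (List.foldl pvStepA (lz, lt, zc, row, (cr.length : Int), cl, cr) xs).2.1) = (lz, lt) := by
  intro xs
  induction xs with
  | nil => intro cr zc row cl lz lt _ _ _; simp
  | cons x xs ih =>
    intro cr zc row cl lz lt h0 hcr hlt
    simp only [List.length_cons] at hlt
    rw [List.foldl_cons]
    by_cases h25 : cr.length + 1 = 25
    · have hrow6 : ¬ (row + 1 = 6) := by omega
      have hstep : pvStepA (lz, lt, zc, row, (cr.length : Int), cl, cr) x =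
          (lz, lt, if x = 0 then zc + 1 else zc, row + 1, 0, cl ++ [cr ++ [x]], []) := by
        simp [pvStepA, hrow6]
        omega
      rw [hstep]
      have := ih [] (if x = 0 then zc + 1 else zc) (row + 1) (cl ++ [cr ++ [x]]) lz lt
        (by omega) (by norm_num) (by simp; omega)
      simpa using this
    · have hrow : ¬ (row = 6) := by omega
      have hstep : pvStepA (lz, lt, zc, row, (cr.length : Int), cl, cr) x =
          (lz, lt, if x = 0 then zc + 1 else zc, row, ((cr ++ [x]).length : Int), cl, cr ++ [x]) := by
        simp [pvStepA, hrow]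
        omega
      rw [hstep]
      exact ih (cr ++ [x]) _ row cl lz lt h0 (by simp; omega) (by simp; omega)

def pvG (xs : List Int) : List Int × List (List (List Int)) :=
  if h : 150 ≤ xs.length then
    let p := pvG (xs.drop 150)
    (pvC0 (xs.take 150) :: p.1, pvRows (xs.take 150) :: p.2)
  else ([], [])
termination_by xs.length
decreasing_by simp; omega

lemma pvAtoG : ∀ (n : Nat) (xs : List Int), xs.length = n →
    ∀ (lz : List Int) (lt : List (List (List Int))),
    ((List.foldl pvStepA (lz, lt, 0, 0, 0, [], []) xs).1,
     (List.foldl pvStepA (lz, lt, 0, 0, 0, [], []) xs).2.1) =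
      (lz ++ (pvG xs).1, lt ++ (pvG xs).2) := by
  intro n
  induction n using Nat.strong_induction_on with
  | _ n ih =>
    intro xs hn lz lt
    by_cases h150 : 150 ≤ xs.length
    · have hx : xs = xs.take 150 ++ xs.drop 150 := (List.take_append_drop _ _).symm
      have hta : (xs.take 150).length = 150 := by simp; omega
      conv_lhs => rw [hx]
      rw [List.foldl_append, pvLayerFold _ hta]
      have hdr : (xs.drop 150).length = n - 150 := by simp [hn]
      have hlt' : n - 150 < n := by omega
      have := ih (n - 150) hlt' (xs.drop 150) hdr (lz ++ [pvC0 (xs.take 150)])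
        (lt ++ [pvRows (xs.take 150)])
      rw [this]
      conv_rhs => rw [pvG]
      rw [dif_pos h150]
      simp
    · have : (List.foldl pvStepA (lz, lt, 0, 0, 0, [], []) xs) =
          (List.foldl pvStepA (lz, lt, 0, 0, ((([] : List Int).length : Int)), [], []) xs) := by
        simp
      rw [this]
      rw [pvTailFold xs [] 0 0 [] lz lt (by norm_num) (by norm_num) (by simp; omega)]
      rw [pvG, dif_neg h150]
      simp

lemma pvFoldlPairMap {α : Type} (l : List α) (f : α → Int) (g : α → List (List Int))
    (a : List Int) (b : List (List (List Int))) :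
    l.foldl (fun acc k => (acc.1 ++ [f k], acc.2 ++ [g k])) (a, b) =
      (a ++ l.map f, b ++ l.map g) := by
  induction l generalizing a b with
  | nil => simp
  | cons x l ih => simp [List.foldl_cons, ih]

lemma pvRowsSlice (layer : List Int) :
    (PySem.List.pyRange 0 6 1).map
      (fun j => PySem.List.slice layer (some (25 * j)) (some (25 * j + 25))) = pvRows layer := by
  have e : PySem.List.pyRange 0 6 1 = [0, 1, 2, 3, 4, 5] := by decide
  rw [e]
  simp only [List.map_cons, List.map_nil, pvRows, show List.range 6 = [0,1,2,3,4,5] from rfl]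
  norm_num
  refine ⟨?_, ?_, ?_, ?_, ?_, ?_⟩
  · rw [PySem.List.slice_to] <;> simp
  all_goals rw [PySem.List.slice_toNat] <;> simp

lemma pvMapChunks : ∀ (m : Nat) (xs : List Int), m = xs.length / 150 →
    ((List.range m).map (fun k => pvC0 ((xs.drop (150 * k)).take 150)),
     (List.range m).map (fun k => pvRows ((xs.drop (150 * k)).take 150))) = pvG xs := by
  intro m
  induction m with
  | zero =>
    intro xs hm
    rw [pvG, dif_neg (by omega)]
    simp
  | succ m ih =>
    intro xs hm
    have h150 : 150 ≤ xs.length := by omega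
    rw [pvG, dif_pos h150]
    have hd : ((xs.drop 150).length) / 150 = m := by simp; omega
    have := ih (xs.drop 150) hd.symm
    rw [List.range_succ_eq_map]
    simp only [List.map_cons, List.map_map]
    rw [← this]
    have hcomp : ∀ (k : Nat), List.drop (150 * Nat.succ k) xs = List.drop (150 * k) (List.drop 150 xs) := by
      intro k
      rw [List.drop_drop]
      congr 1
      omega
    refine Prod.ext ?_ ?_ <;> simp only [Function.comp_def, hcomp] <;> simp

lemma pvBtoG (xs : List Int) : count_and_divide_alt xs = pvG xs := by
  unfold count_and_divide_alt
  dsimp only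
  have hfd : PySem.Int.floordiv (xs.length : Int) (25 * 6) = ((xs.length / 150 : Nat) : Int) := by
    rw [PySem.Int.floordiv_eq_ediv_of_pos (by norm_num)]
    omega
  rw [hfd]
  rw [PySem.List.pyRange_one 0 ((xs.length / 150 : Nat) : Int)]
  have ht : (((xs.length / 150 : Nat) : Int) - 0).toNat = xs.length / 150 := by omega
  rw [ht]
  rw [List.foldl_map]
  have hbody : ∀ (acc : List Int × List (List (List Int))) (k : Nat),
      (fun (acc : List Int × List (List (List Int))) (k : Int) =>
        (acc.1 ++ [((PySem.List.count (PySem.List.slice xs (some (25 * 6 * k)) (some (25 * 6 * k + 25 * 6))) 0 : Nat) : Int)],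
         acc.2 ++ [(PySem.List.pyRange 0 6 1).map
           (fun j => PySem.List.slice (PySem.List.slice xs (some (25 * 6 * k)) (some (25 * 6 * k + 25 * 6))) (some (25 * j)) (some (25 * j + 25)))]))
        acc ((0 : Int) + (k : Int)) =
      (acc.1 ++ [pvC0 ((xs.drop (150 * k)).take 150)],
       acc.2 ++ [pvRows ((xs.drop (150 * k)).take 150)]) := by
    intro acc k
    dsimp only
    have hs : PySem.List.slice xs (some (25 * 6 * ((0 : Int) + (k : Int)))) (some (25 * 6 * ((0 : Int) + (k : Int)) + 25 * 6)) =
        (xs.drop (150 * k)).take 150 := by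
      have e1 : (25 * 6 * ((0 : Int) + (k : Int))) = (((150 * k : Nat) : Int)) := by push_cast; ring
      have e2 : (25 * 6 * ((0 : Int) + (k : Int)) + 25 * 6) = (((150 * k : Nat) : Int) + ((150 : Nat) : Int)) := by push_cast; ring
      rw [e2, e1, PySem.List.slice_natCast_add]
    rw [hs, pvRowsSlice]
    simp [pvC0, PySem.List.count_eq]
  rw [List.foldl_ext _ _ ([], []) (fun a k _ => hbody a k)]
  rw [pvFoldlPairMap]
  rw [← pvMapChunks (xs.length / 150) xs rfl]
  simp

-- ===== VERDICT (by name: the statement is the Claim_ definition above) =====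
theorem count_and_divide_spec : Claim_equal_count_and_divide := by
  intro numbers _
  unfold Spec_count_and_divide count_and_divide
  rw [pvBtoG]
  exact pvAtoG numbers.length numbers rfl [] []
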